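-- pv_equiv track=rewrite | github.com/huangxiaohui1991/trade | scripts/utils/pool_manager.py | _pool_membership_maps
-- ===== SOURCE A (Python) =====
-- def _pool_membership_maps(snapshot: dict | None, stocks_cfg: dict | None = None) -> tuple[set, set]:
--     snapshot = snapshot or {}
--     entries = snapshot.get("entries", []) if isinstance(snapshot, dict) else []
--     core_codes = {str(item.get("code", "")).strip() for item in entries if str(item.get("bucket", "")).strip() == "core"}
--     watch_codes = {str(item.get("code", "")).strip() for item in entries if str(item.get("bucket", "")).strip() == "watch"}
--
--     if core_codes or watch_codes:
--         return core_codes, watch_codes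
--
--     stocks_cfg = stocks_cfg or {}
--     core_codes = {str(item.get("code", "")).strip() for item in stocks_cfg.get("core_pool", [])}
--     watch_codes = {str(item.get("code", "")).strip() for item in stocks_cfg.get("watch_pool", [])}
--     return core_codes, watch_codes
-- ===== SOURCE B (Python) =====
-- def _codes(items):
--     return {str(item.get("code", "")).strip() for item in items}
--
--
-- def _pool_membership_maps(snapshot: dict | None, stocks_cfg: dict | None = None) -> tuple[set, set]:
--     snapshot = snapshot or {}
--     entries = snapshot.get("entries", []) if isinstance(snapshot, dict) else []
--     # Group every entry's code under its (stripped) bucket in one generic index,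
--     # then look the two buckets of interest up.
--     buckets: dict[str, set] = {}
--     for item in entries:
--         buckets.setdefault(str(item.get("bucket", "")).strip(), set()).add(
--             str(item.get("code", "")).strip())
--     core_codes = buckets.get("core", set())
--     watch_codes = buckets.get("watch", set())
--     if core_codes or watch_codes:
--         return core_codes, watch_codes
--     stocks_cfg = stocks_cfg or {}
--     return _codes(stocks_cfg.get("core_pool", [])), _codes(stocks_cfg.get("watch_pool", []))
-- ===== Notes on version B (the rewrite author's own statement) =====
-- stated objective: alternative
-- what changed: Instead of two filtered set comprehensions (one per bucket name), B builds one generic grouping dict bucket->set of codes via setdefault in a single pass and then merely looks up the 'core' and 'watch' keys; the config fallback is factored into a shared _codes helper.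
import Mathlib
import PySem

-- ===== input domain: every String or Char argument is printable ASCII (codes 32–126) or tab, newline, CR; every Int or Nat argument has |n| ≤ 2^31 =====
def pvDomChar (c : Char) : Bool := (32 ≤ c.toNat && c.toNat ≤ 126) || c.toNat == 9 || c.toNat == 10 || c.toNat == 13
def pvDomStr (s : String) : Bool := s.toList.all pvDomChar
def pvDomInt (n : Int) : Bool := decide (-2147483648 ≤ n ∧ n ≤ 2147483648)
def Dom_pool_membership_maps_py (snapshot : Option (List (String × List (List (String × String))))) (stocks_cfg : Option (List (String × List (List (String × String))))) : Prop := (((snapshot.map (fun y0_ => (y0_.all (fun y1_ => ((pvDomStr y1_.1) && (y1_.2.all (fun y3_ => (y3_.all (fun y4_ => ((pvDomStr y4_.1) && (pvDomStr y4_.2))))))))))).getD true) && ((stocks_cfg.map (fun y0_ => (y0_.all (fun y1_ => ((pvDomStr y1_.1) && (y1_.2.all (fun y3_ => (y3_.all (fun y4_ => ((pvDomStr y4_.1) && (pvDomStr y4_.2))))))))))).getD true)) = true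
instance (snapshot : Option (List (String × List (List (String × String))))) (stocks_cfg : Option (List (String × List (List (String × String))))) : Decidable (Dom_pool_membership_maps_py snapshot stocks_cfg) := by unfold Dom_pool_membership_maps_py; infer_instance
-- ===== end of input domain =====

-- B replaces A's per-bucket filtered set comprehensions with one generic grouping
-- dict bucket -> set of codes (built via setdefault) followed by two key lookups;
-- same result, alternative data structure.

-- ===== PORT A =====
def pool_membership_maps_py (snapshot : Option (List (String × List (List (String × String))))) (stocks_cfg : Option (List (String × List (List (String × String))))) : List String × List String :=
  -- snapshot = snapshot or {}; entries = snapshot.get("entries", []) (isinstance always true for a dict)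
  let snap := snapshot.getD []
  let entries := PySem.Dict.getD (PySem.Dict.mk snap) "entries" []
  -- core_codes = {str(item.get("code","")).strip() for item in entries if str(item.get("bucket","")).strip() == "core"}
  let core_codes := PySem.Set.ofList ((entries.filter (fun item => PySem.Str.strip (PySem.Dict.getD (PySem.Dict.mk item) "bucket" "") == "core")).map (fun item => PySem.Str.strip (PySem.Dict.getD (PySem.Dict.mk item) "code" "")))
  let watch_codes := PySem.Set.ofList ((entries.filter (fun item => PySem.Str.strip (PySem.Dict.getD (PySem.Dict.mk item) "bucket" "") == "watch")).map (fun item => PySem.Str.strip (PySem.Dict.getD (PySem.Dict.mk item) "code" "")))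
  if core_codes ≠ [] ∨ watch_codes ≠ [] then
    (core_codes, watch_codes)
  else
    let cfg := stocks_cfg.getD []
    let core_codes := PySem.Set.ofList ((PySem.Dict.getD (PySem.Dict.mk cfg) "core_pool" []).map (fun item => PySem.Str.strip (PySem.Dict.getD (PySem.Dict.mk item) "code" "")))
    let watch_codes := PySem.Set.ofList ((PySem.Dict.getD (PySem.Dict.mk cfg) "watch_pool" []).map (fun item => PySem.Str.strip (PySem.Dict.getD (PySem.Dict.mk item) "code" "")))
    (core_codes, watch_codes)

-- ===== PORT B =====
-- _codes(items) = {str(item.get("code","")).strip() for item in items}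
def pvCodes (items : List (List (String × String))) : List String :=
  PySem.Set.ofList (items.map (fun item => PySem.Str.strip (PySem.Dict.getD (PySem.Dict.mk item) "code" "")))

def pool_membership_maps_py_alt (snapshot : Option (List (String × List (List (String × String))))) (stocks_cfg : Option (List (String × List (List (String × String))))) : List String × List String :=
  let entries := PySem.Dict.getD (PySem.Dict.mk (snapshot.getD [])) "entries" []
  -- buckets.setdefault(str(item.get("bucket","")).strip(), set()).add(str(item.get("code","")).strip())
  let buckets := entries.foldl (fun (d : PySem.Dict String (List String)) item =>
      d.modify (PySem.Str.strip (PySem.Dict.getD (PySem.Dict.mk item) "bucket" "")) []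
        (fun s => PySem.Set.add s (PySem.Str.strip (PySem.Dict.getD (PySem.Dict.mk item) "code" ""))))
    PySem.Dict.empty
  let core_codes := buckets.getD "core" []
  let watch_codes := buckets.getD "watch" []
  if core_codes ≠ [] ∨ watch_codes ≠ [] then (core_codes, watch_codes)
  else
    let cfg := stocks_cfg.getD []
    (pvCodes (PySem.Dict.getD (PySem.Dict.mk cfg) "core_pool" []),
     pvCodes (PySem.Dict.getD (PySem.Dict.mk cfg) "watch_pool" []))

-- ===== PRECONDITION & SPEC =====
def Spec_pool_membership_maps_py (snapshot : Option (List (String × List (List (String × String))))) (stocks_cfg : Option (List (String × List (List (String × String))))) (out : List String × List String) : Prop := out = pool_membership_maps_py_alt snapshot stocks_cfg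
instance (snapshot : Option (List (String × List (List (String × String))))) (stocks_cfg : Option (List (String × List (List (String × String))))) (out : List String × List String) : Decidable (Spec_pool_membership_maps_py snapshot stocks_cfg out) := by unfold Spec_pool_membership_maps_py; infer_instance

-- ===== CLAIM (what is proved, stated in full; the proofs are below) =====
def Claim_equal_pool_membership_maps_py : Prop := ∀ (snapshot : Option (List (String × List (List (String × String))))) (stocks_cfg : Option (List (String × List (List (String × String))))), Dom_pool_membership_maps_py snapshot stocks_cfg → Spec_pool_membership_maps_py snapshot stocks_cfg (pool_membership_maps_py snapshot stocks_cfg)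

-- ===== LEMMAS AND PROOFS =====

-- The grouping loop's bucket k holds exactly the set built from the codes of the
-- entries whose stripped bucket equals k, in entry order.
theorem grouping_getD (entries : List (List (String × String))) (d : PySem.Dict String (List String)) (k : String) :
    (entries.foldl (fun (d : PySem.Dict String (List String)) item =>
      d.modify (PySem.Str.strip (PySem.Dict.getD (PySem.Dict.mk item) "bucket" "")) []
        (fun s => PySem.Set.add s (PySem.Str.strip (PySem.Dict.getD (PySem.Dict.mk item) "code" "")))) d).getD k []
    = ((entries.filter (fun item => PySem.Str.strip (PySem.Dict.getD (PySem.Dict.mk item) "bucket" "") == k)).map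
        (fun item => PySem.Str.strip (PySem.Dict.getD (PySem.Dict.mk item) "code" ""))).foldl PySem.Set.add (d.getD k []) := by
  induction entries generalizing d with
  | nil => rfl
  | cons item rest ih =>
    simp only [List.foldl_cons, List.filter_cons]
    by_cases h : PySem.Str.strip (PySem.Dict.getD (PySem.Dict.mk item) "bucket" "") = k
    · simp only [h, beq_self_eq_true, if_pos, List.map_cons, List.foldl_cons]
      rw [ih]
      rw [PySem.Dict.getD_modify_self]
    · have h' : (PySem.Str.strip (PySem.Dict.getD (PySem.Dict.mk item) "bucket" "") == k) = false := by
        simpa using h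
      simp only [h', Bool.false_eq_true, if_false]
      rw [ih]
      rw [PySem.Dict.getD_modify_of_ne]
      exact fun e => h e.symm

-- set comprehension over a mapped list = accumulator loop adding f of each element
theorem ofList_map_eq_foldl {α β : Type} [BEq β] (f : α → β) (l : List α) :
    PySem.Set.ofList (l.map f) = l.foldl (fun s item => PySem.Set.add s (f item)) [] := by
  rw [PySem.Set.ofList_eq_foldl, List.foldl_map]

-- ===== VERDICT (by name: the statement is the Claim_ definition above) =====
theorem pool_membership_maps_py_spec : Claim_equal_pool_membership_maps_py := by
  intro snapshot stocks_cfg _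
  unfold Spec_pool_membership_maps_py pool_membership_maps_py pool_membership_maps_py_alt pvCodes
  simp only [grouping_getD, PySem.Dict.getD_empty, List.foldl_map, ofList_map_eq_foldl]
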